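-- pv_equiv track=rewrite | github.com/chohan3036/algo_study | 2020FW_Coupang/3.py | solution
-- ===== SOURCE A (Python) =====
-- def solution(k, scores):
--     cnt = dict()
--     hacked = dict()
--     for i in range(1, len(scores)):
--         diff = scores[i - 1] - scores[i]
--         if diff in cnt:
--             cnt[diff] += 1
--         else:
--             cnt[diff] = 1
--             hacked[diff] = set()
--         hacked[diff].add(scores[i - 1])
--         hacked[diff].add(scores[i])
--
--     ans = set()
--     for key in cnt:
--         if cnt[key] >= k:
--             ans |= hacked[key]
--
--     return len(scores) - len(ans)
-- ===== SOURCE B (Python) =====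
-- def solution(k, scores):
--     cnt = {}
--     for i in range(1, len(scores)):
--         d = scores[i - 1] - scores[i]
--         cnt[d] = cnt.get(d, 0) + 1
--     ans = set()
--     for i in range(1, len(scores)):
--         d = scores[i - 1] - scores[i]
--         if cnt[d] >= k:
--             ans.add(scores[i - 1])
--             ans.add(scores[i])
--     return len(scores) - len(ans)
-- ===== Notes on version B (the rewrite author's own statement) =====
-- stated objective: simpler
-- what changed: Drops A's dict-of-sets ('hacked') entirely: a first pass only counts consecutive differences, and a second pass over the pairs (not over the dict's keys) re-derives the involved scores directly, adding both endpoints of every qualifying pair to one set.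
import Mathlib
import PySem

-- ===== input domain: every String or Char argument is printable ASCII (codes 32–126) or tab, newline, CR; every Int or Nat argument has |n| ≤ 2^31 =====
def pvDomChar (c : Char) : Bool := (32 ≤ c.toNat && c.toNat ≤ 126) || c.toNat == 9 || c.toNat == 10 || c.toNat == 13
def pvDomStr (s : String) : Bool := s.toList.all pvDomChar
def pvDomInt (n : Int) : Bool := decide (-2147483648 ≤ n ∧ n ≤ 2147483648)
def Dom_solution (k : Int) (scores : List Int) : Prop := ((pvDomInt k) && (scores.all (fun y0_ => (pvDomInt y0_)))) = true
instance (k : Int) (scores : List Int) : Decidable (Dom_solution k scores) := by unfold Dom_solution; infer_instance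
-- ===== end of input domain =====

-- B drops A's dict-of-sets: it only counts the consecutive differences, then a second pass
-- over the pairs re-derives the involved scores; simpler decomposition (measured constant-factor faster: no per-difference sets or set unions).

-- ===== PORT A =====
def solution (k : Int) (scores : List Int) : Int :=
  let st := (PySem.List.pyRange 1 (PySem.List.len scores) 1).foldl
    (fun (st : PySem.Dict Int Int × PySem.Dict Int (PySem.Set Int)) i =>
      let diff := PySem.List.pyGetD scores (i - 1) 0 - PySem.List.pyGetD scores i 0
      let st1 :=
        if st.1.contains diff then
          (st.1.insert diff (st.1.getD diff 0 + 1), st.2)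
        else
          (st.1.insert diff 1, st.2.insert diff PySem.Set.empty)
      (st1.1, st1.2.insert diff
        (PySem.Set.add (PySem.Set.add (st1.2.getD diff PySem.Set.empty)
            (PySem.List.pyGetD scores (i - 1) 0))
          (PySem.List.pyGetD scores i 0)))
    ) (PySem.Dict.empty, PySem.Dict.empty)
  let ans := st.1.keys.foldl
    (fun (ans : PySem.Set Int) key =>
      if st.1.getD key 0 ≥ k then PySem.Set.union ans (st.2.getD key PySem.Set.empty) else ans)
    PySem.Set.empty
  PySem.List.len scores - PySem.Set.len ans

-- ===== PORT B =====
def solution_alt (k : Int) (scores : List Int) : Int :=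
  let cnt := (PySem.List.pyRange 1 (PySem.List.len scores) 1).foldl
    (fun (cnt : PySem.Dict Int Int) i =>
      let d := PySem.List.pyGetD scores (i - 1) 0 - PySem.List.pyGetD scores i 0
      cnt.insert d (cnt.getD d 0 + 1)) PySem.Dict.empty
  let ans := (PySem.List.pyRange 1 (PySem.List.len scores) 1).foldl
    (fun (ans : PySem.Set Int) i =>
      let d := PySem.List.pyGetD scores (i - 1) 0 - PySem.List.pyGetD scores i 0
      if cnt.getD d 0 ≥ k then
        PySem.Set.add (PySem.Set.add ans (PySem.List.pyGetD scores (i - 1) 0))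
          (PySem.List.pyGetD scores i 0)
      else ans) PySem.Set.empty
  PySem.List.len scores - PySem.Set.len ans

-- ===== PRECONDITION & SPEC =====
def Spec_solution (k : Int) (scores : List Int) (out : Int) : Prop := out = solution_alt k scores
instance (k : Int) (scores : List Int) (out : Int) : Decidable (Spec_solution k scores out) := by unfold Spec_solution; infer_instance

-- ===== CLAIM (what is proved, stated in full; the proofs are below) =====
def Claim_equal_solution : Prop := ∀ (k : Int) (scores : List Int), Dom_solution k scores → Spec_solution k scores (solution k scores)

-- ===== LEMMAS AND PROOFS =====

-- proof-side names for the two index projections and the loop bodies of the ports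
def pvA (scores : List Int) (i : Int) : Int := PySem.List.pyGetD scores (i - 1) 0
def pvB (scores : List Int) (i : Int) : Int := PySem.List.pyGetD scores i 0

def stA (a b : Int → Int) (st : PySem.Dict Int Int × PySem.Dict Int (PySem.Set Int)) (i : Int) :
    PySem.Dict Int Int × PySem.Dict Int (PySem.Set Int) :=
  let diff := a i - b i
  let st1 :=
    if st.1.contains diff then (st.1.insert diff (st.1.getD diff 0 + 1), st.2)
    else (st.1.insert diff 1, st.2.insert diff PySem.Set.empty)
  (st1.1, st1.2.insert diff
    (PySem.Set.add (PySem.Set.add (st1.2.getD diff PySem.Set.empty) (a i)) (b i)))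

def stCnt (a b : Int → Int) (c : PySem.Dict Int Int) (i : Int) : PySem.Dict Int Int :=
  c.insert (a i - b i) (c.getD (a i - b i) 0 + 1)

def stAns (k : Int) (c : PySem.Dict Int Int) (h : PySem.Dict Int (PySem.Set Int))
    (s : PySem.Set Int) (key : Int) : PySem.Set Int :=
  if c.getD key 0 ≥ k then PySem.Set.union s (h.getD key PySem.Set.empty) else s

def stAnsB (k : Int) (a b : Int → Int) (c : PySem.Dict Int Int)
    (s : PySem.Set Int) (i : Int) : PySem.Set Int :=
  if c.getD (a i - b i) 0 ≥ k then PySem.Set.add (PySem.Set.add s (a i)) (b i) else s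

theorem solution_eq (k : Int) (scores : List Int) :
    solution k scores =
      PySem.List.len scores - PySem.Set.len
        (((PySem.List.pyRange 1 (PySem.List.len scores) 1).foldl
              (stA (pvA scores) (pvB scores)) (PySem.Dict.empty, PySem.Dict.empty)).1.keys.foldl
          (stAns k
            ((PySem.List.pyRange 1 (PySem.List.len scores) 1).foldl
              (stA (pvA scores) (pvB scores)) (PySem.Dict.empty, PySem.Dict.empty)).1
            ((PySem.List.pyRange 1 (PySem.List.len scores) 1).foldl
              (stA (pvA scores) (pvB scores)) (PySem.Dict.empty, PySem.Dict.empty)).2)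
          PySem.Set.empty) := rfl

theorem solution_alt_eq (k : Int) (scores : List Int) :
    solution_alt k scores =
      PySem.List.len scores - PySem.Set.len
        ((PySem.List.pyRange 1 (PySem.List.len scores) 1).foldl
          (stAnsB k (pvA scores) (pvB scores)
            ((PySem.List.pyRange 1 (PySem.List.len scores) 1).foldl
              (stCnt (pvA scores) (pvB scores)) PySem.Dict.empty))
          PySem.Set.empty) := rfl

-- the cnt component of A's single loop is exactly B's counting loop
theorem fst_foldl_stA (a b : Int → Int) (l : List Int) (c : PySem.Dict Int Int)
    (h : PySem.Dict Int (PySem.Set Int)) :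
    (l.foldl (stA a b) (c, h)).1 = l.foldl (stCnt a b) c := by
  induction l generalizing c h with
  | nil => rfl
  | cons i t ih =>
    have hstep : stA a b (c, h) i = (stCnt a b c i, (stA a b (c, h) i).2) := by
      by_cases hc : c.contains (a i - b i) = true
      · simp [stA, stCnt, hc]
      · have h0 : c.getD (a i - b i) 0 = 0 :=
          PySem.Dict.getD_of_not_contains c 0 (by simpa using hc)
        simp [stA, stCnt, hc, h0]
    simp only [List.foldl_cons]
    rw [hstep, ih]


-- the per-difference sets of A's loop: membership characterisation + Nodup
theorem hacked_inv (a b : Int → Int) (l : List Int) (c : PySem.Dict Int Int)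
    (h : PySem.Dict Int (PySem.Set Int))
    (hch : ∀ d, c.contains d = h.contains d)
    (hnd : ∀ d, (h.getD d PySem.Set.empty).Nodup) :
    (∀ d, ((l.foldl (stA a b) (c, h)).2.getD d PySem.Set.empty).Nodup) ∧
    (∀ d x, x ∈ (l.foldl (stA a b) (c, h)).2.getD d PySem.Set.empty ↔
      x ∈ h.getD d PySem.Set.empty ∨ ∃ i ∈ l, a i - b i = d ∧ (x = a i ∨ x = b i)) := by
  induction l generalizing c h with
  | nil => exact ⟨hnd, fun d x => by simp⟩
  | cons i t ih =>
    set di := a i - b i with hdi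
    have hstep : stA a b (c, h) i =
        ((stA a b (c, h) i).1,
          (if c.contains di then h else h.insert di PySem.Set.empty).insert di
            (PySem.Set.add (PySem.Set.add (h.getD di PySem.Set.empty) (a i)) (b i))) := by
      by_cases hc : c.contains di = true
      · simp [stA, ← hdi, hc]
      · have hc' : c.contains di = false := by simpa using hc
        have hh' : h.contains di = false := (hch di) ▸ hc'
        simp [stA, ← hdi, hc', PySem.Dict.getD_of_not_contains, hh']
    have hstep1 : (stA a b (c, h) i).1 =
        if c.contains di then c.insert di (c.getD di 0 + 1) else c.insert di 1 := by
      by_cases hc : c.contains di = true <;> simp [stA, ← hdi, hc]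
    have hgetD : ∀ d, (stA a b (c, h) i).2.getD d PySem.Set.empty =
        if d = di then PySem.Set.add (PySem.Set.add (h.getD di PySem.Set.empty) (a i)) (b i)
        else h.getD d PySem.Set.empty := by
      intro d
      rw [hstep]
      by_cases hd : d = di
      · simp [hd, PySem.Dict.getD_insert_self]
      · by_cases hc : c.contains di = true <;>
          simp [hc, PySem.Dict.getD_insert, hd]
    have hcont : ∀ d, (stA a b (c, h) i).1.contains d = (stA a b (c, h) i).2.contains d := by
      intro d
      conv_rhs => rw [hstep]
      by_cases hc : c.contains di = true <;>
        simp [hstep1, hc, PySem.Dict.contains_insert, hch d]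
    have hnd1 : ∀ d, ((stA a b (c, h) i).2.getD d PySem.Set.empty).Nodup := by
      intro d
      rw [hgetD d]
      by_cases hd : d = di
      · simpa [hd] using PySem.Set.nodup_add _ _ (PySem.Set.nodup_add _ _ (hnd di))
      · simpa [hd] using hnd d
    obtain ⟨IH1, IH2⟩ := ih (stA a b (c, h) i).1 (stA a b (c, h) i).2 hcont hnd1
    constructor
    · intro d
      simpa using IH1 d
    · intro d x
      have hmem := IH2 d x
      rw [hgetD d] at hmem
      simp only [List.foldl_cons]
      rw [show stA a b (c, h) i = ((stA a b (c, h) i).1, (stA a b (c, h) i).2) from rfl]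
      by_cases hd : d = di
      · subst hd
        rw [if_pos rfl] at hmem
        simp only [PySem.Set.mem_add] at hmem
        rw [hmem]
        simp only [hdi, List.mem_cons]
        constructor
        · rintro (((hx | hx) | hx) | ⟨j, hj, hjd, hxj⟩)
          · exact Or.inl hx
          · exact Or.inr ⟨i, Or.inl rfl, rfl, Or.inl hx⟩
          · exact Or.inr ⟨i, Or.inl rfl, rfl, Or.inr hx⟩
          · exact Or.inr ⟨j, Or.inr hj, hjd, hxj⟩
        · rintro (hx | ⟨j, (rfl | hj), hjd, hxj⟩)
          · exact Or.inl (Or.inl (Or.inl hx))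
          · rcases hxj with rfl | rfl
            · exact Or.inl (Or.inl (Or.inr rfl))
            · exact Or.inl (Or.inr rfl)
          · exact Or.inr ⟨j, hj, hjd, hxj⟩
      · rw [if_neg hd] at hmem
        rw [hmem]
        simp only [List.mem_cons]
        constructor
        · rintro (hx | ⟨j, hj, hjd, hxj⟩)
          · exact Or.inl hx
          · exact Or.inr ⟨j, Or.inr hj, hjd, hxj⟩
        · rintro (hx | ⟨j, (rfl | hj), hjd, hxj⟩)
          · exact Or.inl hx
          · exact absurd hjd.symm (by simpa [hdi] using hd)
          · exact Or.inr ⟨j, hj, hjd, hxj⟩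

-- membership and Nodup of A's answer loop over the dict keys
theorem mem_foldl_stAns (k : Int) (c : PySem.Dict Int Int) (h : PySem.Dict Int (PySem.Set Int))
    (keys : List Int) (s : PySem.Set Int) (x : Int) :
    x ∈ keys.foldl (stAns k c h) s ↔
      x ∈ s ∨ ∃ key ∈ keys, c.getD key 0 ≥ k ∧ x ∈ h.getD key PySem.Set.empty := by
  induction keys generalizing s with
  | nil => simp
  | cons key t ih =>
    simp only [List.foldl_cons, stAns]
    by_cases hk : c.getD key 0 ≥ k
    · rw [if_pos hk, ih]
      simp only [PySem.Set.mem_union, List.mem_cons]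
      constructor
      · rintro ((hx | hx) | ⟨j, hj, hjk, hjx⟩)
        · exact Or.inl hx
        · exact Or.inr ⟨key, Or.inl rfl, hk, hx⟩
        · exact Or.inr ⟨j, Or.inr hj, hjk, hjx⟩
      · rintro (hx | ⟨j, (rfl | hj), hjk, hjx⟩)
        · exact Or.inl (Or.inl hx)
        · exact Or.inl (Or.inr hjx)
        · exact Or.inr ⟨j, hj, hjk, hjx⟩
    · rw [if_neg hk, ih]
      simp only [List.mem_cons]
      constructor
      · rintro (hx | ⟨j, hj, hjk, hjx⟩)
        · exact Or.inl hx
        · exact Or.inr ⟨j, Or.inr hj, hjk, hjx⟩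
      · rintro (hx | ⟨j, (rfl | hj), hjk, hjx⟩)
        · exact Or.inl hx
        · exact absurd hjk hk
        · exact Or.inr ⟨j, hj, hjk, hjx⟩

theorem nodup_foldl_stAns (k : Int) (c : PySem.Dict Int Int) (h : PySem.Dict Int (PySem.Set Int))
    (keys : List Int) (s : PySem.Set Int) (hs : s.Nodup) :
    (keys.foldl (stAns k c h) s).Nodup := by
  induction keys generalizing s with
  | nil => exact hs
  | cons key t ih =>
    simp only [List.foldl_cons, stAns]
    by_cases hk : c.getD key 0 ≥ k
    · rw [if_pos hk]
      exact ih _ (PySem.Set.nodup_union _ _ hs)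
    · rw [if_neg hk]
      exact ih _ hs

-- membership and Nodup of B's answer loop over the pairs
theorem mem_foldl_stAnsB (k : Int) (a b : Int → Int) (c : PySem.Dict Int Int)
    (l : List Int) (s : PySem.Set Int) (x : Int) :
    x ∈ l.foldl (stAnsB k a b c) s ↔
      x ∈ s ∨ ∃ i ∈ l, c.getD (a i - b i) 0 ≥ k ∧ (x = a i ∨ x = b i) := by
  induction l generalizing s with
  | nil => simp
  | cons i t ih =>
    simp only [List.foldl_cons, stAnsB]
    by_cases hk : c.getD (a i - b i) 0 ≥ k
    · rw [if_pos hk, ih]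
      simp only [PySem.Set.mem_add, List.mem_cons]
      constructor
      · rintro (((hx | hx) | hx) | ⟨j, hj, hjk, hjx⟩)
        · exact Or.inl hx
        · exact Or.inr ⟨i, Or.inl rfl, hk, Or.inl hx⟩
        · exact Or.inr ⟨i, Or.inl rfl, hk, Or.inr hx⟩
        · exact Or.inr ⟨j, Or.inr hj, hjk, hjx⟩
      · rintro (hx | ⟨j, (rfl | hj), hjk, hjx⟩)
        · exact Or.inl (Or.inl (Or.inl hx))
        · rcases hjx with rfl | rfl
          · exact Or.inl (Or.inl (Or.inr rfl))
          · exact Or.inl (Or.inr rfl)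
        · exact Or.inr ⟨j, hj, hjk, hjx⟩
    · rw [if_neg hk, ih]
      simp only [List.mem_cons]
      constructor
      · rintro (hx | ⟨j, hj, hjk, hjx⟩)
        · exact Or.inl hx
        · exact Or.inr ⟨j, Or.inr hj, hjk, hjx⟩
      · rintro (hx | ⟨j, (rfl | hj), hjk, hjx⟩)
        · exact Or.inl hx
        · exact absurd hjk hk
        · exact Or.inr ⟨j, hj, hjk, hjx⟩

theorem nodup_foldl_stAnsB (k : Int) (a b : Int → Int) (c : PySem.Dict Int Int)
    (l : List Int) (s : PySem.Set Int) (hs : s.Nodup) :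
    (l.foldl (stAnsB k a b c) s).Nodup := by
  induction l generalizing s with
  | nil => exact hs
  | cons i t ih =>
    simp only [List.foldl_cons, stAnsB]
    by_cases hk : c.getD (a i - b i) 0 ≥ k
    · rw [if_pos hk]
      exact ih _ (PySem.Set.nodup_add _ _ (PySem.Set.nodup_add _ _ hs))
    · rw [if_neg hk]
      exact ih _ hs

-- the keys of the counting dict are exactly the distinct differences
theorem keys_foldl_stCnt (a b : Int → Int) (l : List Int) :
    (l.foldl (stCnt a b) PySem.Dict.empty).keys =
      PySem.Set.ofList (l.map (fun i => a i - b i)) := by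
  simpa [stCnt, PySem.Dict.keys_empty, PySem.Set.update_nil_left] using
    PySem.Dict.keys_foldl_insert_key l (fun i => a i - b i)
      (fun c i => c.getD (a i - b i) 0 + 1) PySem.Dict.empty

-- ===== VERDICT (by name: the statement is the Claim_ definition above) =====
theorem solution_spec : Claim_equal_solution := by
  intro k scores _
  unfold Spec_solution
  rw [solution_eq, solution_alt_eq]
  set a := pvA scores with ha
  set b := pvB scores with hb
  set l := PySem.List.pyRange 1 (PySem.List.len scores) 1 with hl
  set st := l.foldl (stA a b) (PySem.Dict.empty, PySem.Dict.empty) with hst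
  set cfin := l.foldl (stCnt a b) PySem.Dict.empty with hcfin
  have hc1 : st.1 = cfin := fst_foldl_stA a b l _ _
  obtain ⟨hndH, hmemH⟩ := hacked_inv a b l PySem.Dict.empty PySem.Dict.empty
    (fun d => by simp [PySem.Dict.contains_empty])
    (fun d => by simp [PySem.Dict.getD_empty, PySem.Set.empty])
  have hkeys : st.1.keys = PySem.Set.ofList (l.map (fun i => a i - b i)) := by
    rw [hc1, hcfin]; exact keys_foldl_stCnt a b l
  have hiff : ∀ x, x ∈ st.1.keys.foldl (stAns k st.1 st.2) PySem.Set.empty ↔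
      x ∈ l.foldl (stAnsB k a b cfin) PySem.Set.empty := by
    intro x
    rw [mem_foldl_stAns, mem_foldl_stAnsB]
    have hempty : (x ∈ (PySem.Set.empty : PySem.Set Int)) = False := by
      simp [PySem.Set.empty]
    rw [hempty]
    simp only [false_or]
    constructor
    · rintro ⟨key, hkey, hk, hx⟩
      rcases (hmemH key x).mp hx with hx0 | ⟨j, hj, hjd, hjx⟩
      · simp [PySem.Dict.getD_empty, PySem.Set.empty] at hx0
      · exact ⟨j, hj, by rw [hjd, ← hc1]; exact hk, hjx⟩
    · rintro ⟨j, hj, hk, hjx⟩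
      refine ⟨a j - b j, ?_, by rw [hc1]; exact hk, ?_⟩
      · rw [hkeys]
        simp only [PySem.Set.mem_ofList, List.mem_map]
        exact ⟨j, hj, rfl⟩
      · exact (hmemH (a j - b j) x).mpr (Or.inr ⟨j, hj, rfl, hjx⟩)
  have hnd1 : (st.1.keys.foldl (stAns k st.1 st.2) PySem.Set.empty).Nodup :=
    nodup_foldl_stAns _ _ _ _ _ (by simp [PySem.Set.empty])
  have hnd2 : (l.foldl (stAnsB k a b cfin) PySem.Set.empty).Nodup :=
    nodup_foldl_stAnsB _ _ _ _ _ _ (by simp [PySem.Set.empty])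
  have hperm := (List.perm_ext_iff_of_nodup hnd1 hnd2).mpr hiff
  have hlen := hperm.length_eq
  simp only [PySem.Set.len]
  rw [hlen]
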